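-- pv_equiv track=rewrite | github.com/xcomputing-vicrispr/backend | app/api/worker/computing.py | iupac_combinations
-- ===== SOURCE A (Python) =====
-- def iupac_combinations(seq: str):
--     iupac_map = {
--         'A': 1, 'C': 1, 'G': 1, 'T': 1,
--         'R': 2, 'Y': 2, 'S': 2, 'W': 2, 'K': 2, 'M': 2,
--         'B': 3, 'D': 3, 'H': 3, 'V': 3,
--         'N': 4
--     }
--
--     seq = seq.upper()
--     total = 1
--     for base in seq:
--         total *= iupac_map.get(base, 1)
--     return total
-- ===== SOURCE B (Python) =====
-- def iupac_combinations(seq: str):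
--     s = seq.upper()
--     n2 = sum(1 for c in s if c in "RYSWKM")
--     n3 = sum(1 for c in s if c in "BDHV")
--     n4 = sum(1 for c in s if c == "N")
--     return 2 ** n2 * 3 ** n3 * 4 ** n4
-- ===== Notes on version B (the rewrite author's own statement) =====
-- stated objective: alternative
-- what changed: Replaces the running base-by-base product with a two-phase tally-then-exponentiate decomposition: count characters in each degeneracy class (2, 3, 4) and return the closed-form product of powers 2**n2 * 3**n3 * 4**n4.
import Mathlib
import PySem

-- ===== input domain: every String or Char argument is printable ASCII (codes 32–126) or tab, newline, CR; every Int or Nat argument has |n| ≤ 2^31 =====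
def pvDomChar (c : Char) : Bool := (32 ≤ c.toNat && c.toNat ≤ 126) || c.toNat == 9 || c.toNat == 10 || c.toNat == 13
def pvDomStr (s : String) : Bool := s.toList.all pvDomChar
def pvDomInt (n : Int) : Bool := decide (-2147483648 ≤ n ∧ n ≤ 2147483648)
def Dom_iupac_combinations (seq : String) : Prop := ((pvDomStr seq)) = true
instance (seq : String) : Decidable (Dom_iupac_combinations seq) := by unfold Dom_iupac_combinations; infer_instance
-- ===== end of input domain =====

-- B tallies each IUPAC degeneracy class and returns 2^n2*3^n3*4^n4 instead of A's
-- running per-base product; same O(n) cost, different decomposition.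


-- ===== PORT A =====
def iupacMapA : PySem.Dict Char Int :=
  PySem.Dict.ofList [('A',1), ('C',1), ('G',1), ('T',1),
                     ('R',2), ('Y',2), ('S',2), ('W',2), ('K',2), ('M',2),
                     ('B',3), ('D',3), ('H',3), ('V',3),
                     ('N',4)]

def iupac_combinations (seq : String) : Int :=
  (PySem.Str.upper seq).toList.foldl (fun total base => total * iupacMapA.getD base 1) 1

-- ===== PORT B =====
def iupac_combinations_alt (seq : String) : Int :=
  let s := (PySem.Str.upper seq).toList
  let n2 := s.countP (fun c => "RYSWKM".toList.contains c)
  let n3 := s.countP (fun c => "BDHV".toList.contains c)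
  let n4 := s.countP (fun c => c == 'N')
  (2 : Int) ^ n2 * (3 : Int) ^ n3 * (4 : Int) ^ n4

-- ===== PRECONDITION & SPEC =====
def Spec_iupac_combinations (seq : String) (out : Int) : Prop := out = iupac_combinations_alt seq
instance (seq : String) (out : Int) : Decidable (Spec_iupac_combinations seq out) := by unfold Spec_iupac_combinations; infer_instance

-- ===== CLAIM (what is proved, stated in full; the proofs are below) =====
def Claim_equal_iupac_combinations : Prop := ∀ (seq : String), Dom_iupac_combinations seq → Spec_iupac_combinations seq (iupac_combinations seq)

-- ===== LEMMAS AND PROOFS =====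

-- per-character bridge: A's dict lookup equals B's class-indicator power product
theorem iupac_char_eq (c : Char) :
    iupacMapA.getD c 1 =
      (2 : Int) ^ (if "RYSWKM".toList.contains c then 1 else 0)
      * (3 : Int) ^ (if "BDHV".toList.contains c then 1 else 0)
      * (4 : Int) ^ (if c == 'N' then 1 else 0) := by
  by_cases hA : c = 'A'; · subst hA; decide
  by_cases hC : c = 'C'; · subst hC; decide
  by_cases hG : c = 'G'; · subst hG; decide
  by_cases hT : c = 'T'; · subst hT; decide
  by_cases hR : c = 'R'; · subst hR; decide
  by_cases hY : c = 'Y'; · subst hY; decide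
  by_cases hS : c = 'S'; · subst hS; decide
  by_cases hW : c = 'W'; · subst hW; decide
  by_cases hK : c = 'K'; · subst hK; decide
  by_cases hM : c = 'M'; · subst hM; decide
  by_cases hB : c = 'B'; · subst hB; decide
  by_cases hD : c = 'D'; · subst hD; decide
  by_cases hH : c = 'H'; · subst hH; decide
  by_cases hV : c = 'V'; · subst hV; decide
  by_cases hN : c = 'N'; · subst hN; decide
  have hmk : iupacMapA = PySem.Dict.mk [('A',1), ('C',1), ('G',1), ('T',1),
      ('R',2), ('Y',2), ('S',2), ('W',2), ('K',2), ('M',2),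
      ('B',3), ('D',3), ('H',3), ('V',3), ('N',4)] := by decide
  simp [hmk, PySem.Dict.getD, PySem.Dict.get?_mk_cons,
    Ne.symm hA, Ne.symm hC, Ne.symm hG, Ne.symm hT, Ne.symm hR, Ne.symm hY,
    Ne.symm hS, Ne.symm hW, Ne.symm hK, Ne.symm hM, Ne.symm hB, Ne.symm hD,
    Ne.symm hH, Ne.symm hV, Ne.symm hN, hR, hY, hS, hW, hK, hM, hB, hD, hH, hV, hN]
  rfl

theorem iupac_fold_eq (l : List Char) (t : Int) :
    l.foldl (fun total base => total * iupacMapA.getD base 1) t =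
      t * (2 : Int) ^ (l.countP (fun c => "RYSWKM".toList.contains c))
        * (3 : Int) ^ (l.countP (fun c => "BDHV".toList.contains c))
        * (4 : Int) ^ (l.countP (fun c => c == 'N')) := by
  induction l generalizing t with
  | nil => simp
  | cons a l ih =>
    simp only [List.foldl_cons, List.countP_cons, ih, iupac_char_eq a]
    split_ifs <;> ring

-- ===== VERDICT (by name: the statement is the Claim_ definition above) =====
theorem iupac_combinations_spec : Claim_equal_iupac_combinations := by
  intro seq _
  unfold Spec_iupac_combinations iupac_combinations iupac_combinations_alt
  rw [iupac_fold_eq]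
  ring
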